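-- pv_equiv track=rewrite | github.com/calvincramer/coding-challenges | project-euler/problems/python/719/719.py | smart_tree_search
-- ===== SOURCE A (Python) =====
-- def _calculate_test(nums, split_joins, undecided_use='j') -> int:
--     """
--     Calculate the value of an array of digits with decisions to either join or split each one.
--     Can change '?' values to a either join or split
--     """
--     # split_joins may be too small
--     if len(split_joins) + 1 < len(nums):
--         diff = len(nums) - len(split_joins) - 1
--         split_joins = split_joins + ([undecided_use] * diff)
--
--     # Decide on undecided
--     for idx in range(len(split_joins)):
--         if split_joins[idx] == '?':
--             split_joins[idx] = undecided_use
--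
--     value = 0
--     i = 0
--     nums_len = len(nums)
--     split_joins_len = len(split_joins)
--
--     while i < nums_len:
--         temp_sum = nums[i]
--         if i == split_joins_len:    # Last number special
--             value += temp_sum
--             break
--         if split_joins[i] == 'j':
--             j = i
--             while j < split_joins_len and split_joins[j] == 'j':
--                 j += 1
--                 temp_sum = (temp_sum*10) + nums[j]
--             i = j + 1
--         else:   # sj_i == 's':
--             i += 1
--         value += temp_sum
--     return value
--
-- def smart_tree_search(nums, split_joins, target: int) -> bool:
--     """Don't descent down impossible paths"""
--     # Leaf
--     if len(split_joins) + 1 == len(nums):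
--         return target == _calculate_test(nums, split_joins)
--
--     # Descend
--     _min = _calculate_test(nums, split_joins, undecided_use='s')
--     _max = _calculate_test(nums, split_joins, undecided_use='j')
--
--     if _min <= target <= _max:
--         # Left -> join
--         left_ans = smart_tree_search(nums, split_joins + ['j'], target)
--         if left_ans is True:
--             return True
--         # Right -> split
--         right_ans = smart_tree_search(nums, split_joins + ['s'], target)
--         if right_ans is True:
--             return True
--     return False
-- ===== SOURCE B (Python) =====
-- def smart_tree_search(nums, split_joins, target: int) -> bool:
--     # Level-by-level DP over a deduplicated set of (sum, run) states instead of A's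
--     # recursive branch-and-bound tree search (return value only; A may replace '?'
--     # in the caller's list when it is already full-length, B never mutates it).
--     n = len(nums)
--     k = len(split_joins)
--     # Paired fold over the fixed prefix: the x-state reads '?' as a split (A's lower
--     # bound), the y-state reads '?' as a join (A's upper bound and leaf value).
--     sx, rx = 0, nums[0]
--     sy, ry = 0, nums[0]
--     for d, dig in zip(split_joins, nums[1:]):
--         if d == 'j':
--             rx, ry = rx * 10 + dig, ry * 10 + dig
--         elif d == '?':
--             sx, rx = sx + rx, dig
--             ry = ry * 10 + dig
--         else:
--             sx, rx = sx + rx, dig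
--             sy, ry = sy + ry, dig
--     if k == n - 1:
--         return target == sy + ry
--     states = {(sx, rx, sy, ry)}
--     for t in range(k, n - 1):
--         rest = nums[t + 1:]
--         lo_tail = sum(rest)
--         p = 10 ** len(rest)
--         hi_tail = 0
--         for d in rest:
--             hi_tail = hi_tail * 10 + d
--         dig = nums[t + 1]
--         nxt = set()
--         for (ax, bx, ay, by) in states:
--             if ax + bx + lo_tail <= target <= ay + by * p + hi_tail:
--                 nxt.add((ax, bx * 10 + dig, ay, by * 10 + dig))
--                 nxt.add((ax + bx, dig, ay + by, dig))
--         states = nxt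
--     return any(ay + by == target for (_, _, ay, by) in states)
-- ===== Notes on version B (the rewrite author's own statement) =====
-- stated objective: alternative
-- what changed: Replaces A's recursive branch-and-bound over growing decision lists (each node recomputing min/max bounds with O(n) _calculate_test passes and copying the list) with a left-to-right level-by-level DP over a deduplicated set of (closed-sum, current-run) state tuples using per-level suffix bounds.
-- outside the precondition, e.g. on smart_tree_search([], [], 5): A returns False, B raises IndexError; on smart_tree_search([-1, 2], ['?', 's'], -8): A returns False, B returns True; on smart_tree_search([-1, 2], ['?', 's'], 4): A returns False, B returns False
import Mathlib
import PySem

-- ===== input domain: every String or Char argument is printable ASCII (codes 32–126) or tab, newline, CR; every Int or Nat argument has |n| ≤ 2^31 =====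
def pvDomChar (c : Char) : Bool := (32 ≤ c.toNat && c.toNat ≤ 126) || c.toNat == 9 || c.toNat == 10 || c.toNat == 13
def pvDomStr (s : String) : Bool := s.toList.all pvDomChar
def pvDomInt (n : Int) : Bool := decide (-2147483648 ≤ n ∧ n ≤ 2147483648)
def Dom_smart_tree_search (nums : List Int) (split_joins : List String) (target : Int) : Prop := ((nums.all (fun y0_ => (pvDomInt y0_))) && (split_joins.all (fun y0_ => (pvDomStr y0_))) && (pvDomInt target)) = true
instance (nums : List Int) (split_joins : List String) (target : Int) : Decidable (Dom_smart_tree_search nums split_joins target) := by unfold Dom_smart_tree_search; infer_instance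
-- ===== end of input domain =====

-- B replaces A's recursive branch-and-bound over growing decision lists by a
-- level-by-level DP over a deduplicated set of (sum, run) state tuples; the
-- equivalence is about the RETURN value only (A replaces '?' by 'j' in the
-- caller's list when it is already full-length, B never mutates its arguments).

-- ===== PORT A =====
-- inner 'while j < split_joins_len and split_joins[j] == 'j'' loop of _calculate_test
def pvCalcInner (fuel : Nat) (nums : List Int) (sj : List String) (j : Nat) (temp : Int) : Nat × Int :=
  match fuel with
  | 0 => (j, temp)
  | f + 1 =>
    if j < sj.length ∧ sj.getD j "" = "j" then
      pvCalcInner f nums sj (j + 1) (temp * 10 + nums.getD (j + 1) 0)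
    else (j, temp)

-- outer 'while i < nums_len' loop of _calculate_test (fuel bounds the iteration count)
def pvCalcLoop (fuel : Nat) (nums : List Int) (sj : List String) (i : Nat) (value : Int) : Int :=
  match fuel with
  | 0 => value
  | f + 1 =>
    if i < nums.length then
      let temp := nums.getD i 0
      if i = sj.length then value + temp
      else if sj.getD i "" = "j" then
        let p := pvCalcInner (sj.length - i) nums sj i temp
        pvCalcLoop f nums sj (p.1 + 1) (value + p.2)
      else pvCalcLoop f nums sj (i + 1) (value + temp)
    else value

-- _calculate_test(nums, split_joins, undecided_use)
def pvCalcTest (nums : List Int) (split_joins : List String) (u : String) : Int :=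
  let sj1 := if split_joins.length + 1 < nums.length
    then split_joins ++ List.replicate (nums.length - split_joins.length - 1) u
    else split_joins
  let sj := sj1.map (fun x => if x = "?" then u else x)
  pvCalcLoop nums.length nums sj 0 0

-- the recursion of smart_tree_search (fuel = remaining recursion depth)
def pvStsGo (fuel : Nat) (nums : List Int) (sj : List String) (target : Int) : Bool :=
  match fuel with
  | 0 => false
  | f + 1 =>
    if sj.length + 1 = nums.length then target == pvCalcTest nums sj "j"
    else
      let mn := pvCalcTest nums sj "s"
      let mx := pvCalcTest nums sj "j"
      if mn ≤ target ∧ target ≤ mx then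
        pvStsGo f nums (sj ++ ["j"]) target || pvStsGo f nums (sj ++ ["s"]) target
      else false

def smart_tree_search (nums : List Int) (split_joins : List String) (target : Int) : Bool :=
  pvStsGo (nums.length + 1 - split_joins.length) nums split_joins target

-- ===== PORT B =====
def smart_tree_search_alt (nums : List Int) (split_joins : List String) (target : Int) : Bool :=
  let n := nums.length
  let k := split_joins.length
  let st0 : Int × Int × Int × Int :=
    List.foldl (fun (st : Int × Int × Int × Int) (pr : String × Int) =>
        if pr.1 = "j" then (st.1, st.2.1 * 10 + pr.2, st.2.2.1, st.2.2.2 * 10 + pr.2)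
        else if pr.1 = "?" then (st.1 + st.2.1, pr.2, st.2.2.1, st.2.2.2 * 10 + pr.2)
        else (st.1 + st.2.1, pr.2, st.2.2.1 + st.2.2.2, pr.2))
      (0, nums.getD 0 0, 0, nums.getD 0 0) (split_joins.zip (List.drop 1 nums))
  if (k : Int) = (n : Int) - 1 then target == st0.2.2.1 + st0.2.2.2
  else
    let states0 : PySem.Set (Int × Int × Int × Int) := PySem.Set.ofList [st0]
    let final := List.foldl (fun (F : PySem.Set (Int × Int × Int × Int)) (t : Int) =>
        let rest := PySem.List.slice nums (some (t + 1)) none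
        let loTail := rest.sum
        let p : Int := 10 ^ rest.length
        let hiTail := List.foldl (fun a d => a * 10 + d) 0 rest
        let dig := PySem.List.pyGetD nums (t + 1) 0
        List.foldl (fun (nxt : PySem.Set (Int × Int × Int × Int)) st =>
            if st.1 + st.2.1 + loTail ≤ target ∧ target ≤ st.2.2.1 + st.2.2.2 * p + hiTail then
              PySem.Set.add (PySem.Set.add nxt (st.1, st.2.1 * 10 + dig, st.2.2.1, st.2.2.2 * 10 + dig))
                (st.1 + st.2.1, dig, st.2.2.1 + st.2.2.2, dig)
            else nxt)
          PySem.Set.empty F)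
      states0 (PySem.List.pyRange (k : Int) ((n : Int) - 1) 1)
    final.any (fun st => st.2.2.1 + st.2.2.2 == target)

-- ===== PRECONDITION & SPEC =====
-- abstract one-decision step: join the next digit onto the run, or close the group
def pvStep (jn : String → Bool) (st : Int × Int) (pr : String × Int) : Int × Int :=
  if jn pr.1 then (st.1, st.2 * 10 + pr.2) else (st.1 + st.2, pr.2)

def pvJy (d : String) : Bool := d = "j" || d = "?"  -- '?' read as join

-- state of the fold over the decisions with '?' read as join ('j'): A's upper bound and leaf value
def pvY (nums : List Int) (sj : List String) : Int × Int :=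
  List.foldl (pvStep pvJy) (0, nums.getD 0 0) (sj.zip (List.drop 1 nums))

-- Pre_ excludes empty nums (A returns an accidental False there unless target = 0, where it
-- recurses unboundedly; B raises IndexError), and, among over-long split_joins (longer than
-- len(nums)-1), those where A raises (last effective entry 'j' -> IndexError; target equal to
-- the determined value -> unbounded recursion) or where a '?' among the effective decisions
-- makes A's value an artefact of _calculate_test's in-place '?' rewriting between its two calls.
def Pre_smart_tree_search (nums : List Int) (split_joins : List String) (target : Int) : Prop :=
  nums ≠ [] ∧
  (split_joins.length + 1 ≤ nums.length ∨
    (¬ split_joins.getD (nums.length - 1) "" = "j" ∧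
     ¬ "?" ∈ split_joins.take (nums.length - 1) ∧
     target ≠ (pvY nums split_joins).1 + (pvY nums split_joins).2))
instance (nums : List Int) (split_joins : List String) (target : Int) : Decidable (Pre_smart_tree_search nums split_joins target) := by unfold Pre_smart_tree_search; infer_instance

def pvWitness_smart_tree_search : List Int × List String × Int := ([1, 2, 3], ["j"], 15)

def Spec_smart_tree_search (nums : List Int) (split_joins : List String) (target : Int) (out : Bool) : Prop := out = smart_tree_search_alt nums split_joins target
instance (nums : List Int) (split_joins : List String) (target : Int) (out : Bool) : Decidable (Spec_smart_tree_search nums split_joins target out) := by unfold Spec_smart_tree_search; infer_instance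

-- ===== CLAIM (what is proved, stated in full; the proofs are below) =====
def Claim_equal_smart_tree_search : Prop := ∀ (nums : List Int) (split_joins : List String) (target : Int), Dom_smart_tree_search nums split_joins target → Pre_smart_tree_search nums split_joins target → Spec_smart_tree_search nums split_joins target (smart_tree_search nums split_joins target)

-- ===== LEMMAS AND PROOFS =====

def pvJx (d : String) : Bool := d = "j"          -- '?' read as split

-- state of the fold over the decisions with '?' read as split: A's lower bound
def pvX (nums : List Int) (sj : List String) : Int × Int :=
  List.foldl (pvStep pvJx) (0, nums.getD 0 0) (sj.zip (List.drop 1 nums))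

def pvCat (l : List Int) : Int := List.foldl (fun a d => a * 10 + d) 0 l

-- shared reference semantics of the pruned search, by recursion on the remaining digits
def pvRes (target : Int) : List Int → (Int × Int) → (Int × Int) → Bool
  | [], _, y => target == y.1 + y.2
  | d :: rest, x, y =>
    if x.1 + x.2 + (d + rest.sum) ≤ target ∧
        target ≤ y.1 + y.2 * 10 ^ (rest.length + 1) + pvCat (d :: rest) then
      pvRes target rest (x.1, x.2 * 10 + d) (y.1, y.2 * 10 + d) ||
      pvRes target rest (x.1 + x.2, d) (y.1 + y.2, d)
    else false


theorem pvFoldlShift (jn : String → Bool) (l : List (String × Int)) :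
    ∀ (S c r : Int), List.foldl (pvStep jn) (S + c, r) l =
      ((List.foldl (pvStep jn) (S, r) l).1 + c, (List.foldl (pvStep jn) (S, r) l).2) := by
  induction l with
  | nil => intro S c r; rfl
  | cons p l ih =>
    intro S c r
    simp only [List.foldl_cons, pvStep]
    by_cases h : jn p.1 <;> simp only [h, if_true, if_false, ite_true, ite_false]
    · exact ih S c (r * 10 + p.2)
    · have := ih (S + r) c p.2
      simpa [add_right_comm] using this

theorem pvCatShift (l : List Int) : ∀ a : Int,
    List.foldl (fun a d => a * 10 + d) a l = a * 10 ^ l.length + pvCat l := by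
  induction l with
  | nil => intro a; simp [pvCat]
  | cons d rest ih =>
    intro a
    simp only [List.foldl_cons, List.length_cons, pvCat, zero_mul, zero_add]
    rw [ih (a * 10 + d), ih d]
    ring

theorem pvTailS (jn : String → Bool) (u : String) (hu : jn u = false) (l : List Int) :
    ∀ (S r : Int),
      (List.foldl (pvStep jn) (S, r) ((List.replicate l.length u).zip l)).1 +
        (List.foldl (pvStep jn) (S, r) ((List.replicate l.length u).zip l)).2 = S + r + l.sum := by
  induction l with
  | nil => intro S r; simp
  | cons d rest ih =>
    intro S r
    simp only [List.length_cons, List.replicate_succ, List.zip_cons_cons, List.foldl_cons,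
      pvStep, hu, List.sum_cons, if_false, Bool.false_eq_true, ite_false]
    rw [ih (S + r) d]
    ring

theorem pvTailJ (jn : String → Bool) (u : String) (hu : jn u = true) (l : List Int) :
    ∀ (S r : Int),
      List.foldl (pvStep jn) (S, r) ((List.replicate l.length u).zip l) =
        (S, r * 10 ^ l.length + pvCat l) := by
  induction l with
  | nil => intro S r; simp [pvCat]
  | cons d rest ih =>
    intro S r
    simp only [List.length_cons, List.replicate_succ, List.zip_cons_cons, List.foldl_cons,
      pvStep, hu, if_true, ite_true]
    rw [ih S (r * 10 + d)]
    have hc : pvCat (d :: rest) = d * 10 ^ rest.length + pvCat rest := by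
      simp only [pvCat, List.foldl_cons, zero_mul, zero_add]
      rw [pvCatShift]
      rfl
    rw [hc]
    simp only [Prod.mk.injEq, true_and]
    ring

theorem pvZipAppendSplit (l1 l2 : List String) :
    ∀ tl : List Int, l1.length ≤ tl.length →
      (l1 ++ l2).zip tl = l1.zip tl ++ l2.zip (tl.drop l1.length) := by
  induction l1 with
  | nil => intro tl _; simp
  | cons a l ih =>
    intro tl h
    cases tl with
    | nil => simp at h
    | cons b tl =>
      simp only [List.cons_append, List.zip_cons_cons, List.length_cons, List.drop_succ_cons]
      rw [ih tl (by simpa using h)]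

theorem pvMapZipFold (jn : String → Bool) (f : String → String) (l : List String) :
    ∀ (tl : List Int) (st : Int × Int),
      List.foldl (pvStep jn) st ((l.map f).zip tl) =
        List.foldl (pvStep (fun d => jn (f d))) st (l.zip tl) := by
  induction l with
  | nil => intro tl st; simp
  | cons a l ih =>
    intro tl st
    cases tl with
    | nil => simp
    | cons b tl =>
      simp only [List.map_cons, List.zip_cons_cons, List.foldl_cons]
      rw [ih]
      rfl

theorem pvReJx : (fun d => pvJx (if d = "?" then "s" else d)) = pvJx := by
  funext d
  by_cases h : d = "?" <;> simp [pvJx, h]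

theorem pvReJy : (fun d => pvJx (if d = "?" then "j" else d)) = pvJy := by
  funext d
  by_cases h : d = "?" <;> simp [pvJx, pvJy, h]


theorem pvInnerSpec (nums : List Int) (sj : List String) (hn : sj.length + 1 ≤ nums.length) :
    ∀ (fuel j : Nat) (temp : Int), j ≤ sj.length → sj.length - j ≤ fuel →
      j ≤ (pvCalcInner fuel nums sj j temp).1 ∧
      (pvCalcInner fuel nums sj j temp).1 ≤ sj.length ∧
      ((pvCalcInner fuel nums sj j temp).1 = sj.length ∨
        ¬ sj.getD (pvCalcInner fuel nums sj j temp).1 "" = "j") ∧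
      ∀ S : Int,
        List.foldl (pvStep pvJx) (S, temp) ((sj.drop j).zip (nums.drop (j + 1))) =
          List.foldl (pvStep pvJx) (S, (pvCalcInner fuel nums sj j temp).2)
            ((sj.drop (pvCalcInner fuel nums sj j temp).1).zip
              (nums.drop ((pvCalcInner fuel nums sj j temp).1 + 1))) := by
  intro fuel
  induction fuel with
  | zero =>
    intro j temp hj hf
    have hje : j = sj.length := by omega
    exact ⟨Nat.le.refl, le_of_eq hje, Or.inl hje, fun S => rfl⟩
  | succ f ih =>
    intro j temp hj hf
    by_cases hc : j < sj.length ∧ sj.getD j "" = "j"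
    · have hrec : pvCalcInner (f + 1) nums sj j temp =
          pvCalcInner f nums sj (j + 1) (temp * 10 + nums.getD (j + 1) 0) := by
        simp only [pvCalcInner]
        rw [if_pos hc]
      obtain ⟨h1, h2, h3, h4⟩ := ih (j + 1) (temp * 10 + nums.getD (j + 1) 0) (by omega) (by omega)
      rw [hrec]
      refine ⟨by omega, h2, h3, fun S => ?_⟩
      rw [← h4 S]
      have hjlt : j < sj.length := hc.1
      have hjn : j + 1 < nums.length := by omega
      rw [List.drop_eq_getElem_cons hjlt, List.drop_eq_getElem_cons hjn,
        List.zip_cons_cons, List.foldl_cons]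
      have hsj : sj[j] = "j" := by rw [← List.getD_eq_getElem sj "" hjlt]; exact hc.2
      have hnum : nums.getD (j + 1) 0 = nums[j + 1] := List.getD_eq_getElem nums 0 hjn
      simp only [pvStep, pvJx, hsj, hnum, decide_true, if_pos]
    · have hrec : pvCalcInner (f + 1) nums sj j temp = (j, temp) := by
        simp only [pvCalcInner]
        rw [if_neg hc]
      rw [hrec]
      refine ⟨Nat.le.refl, hj, ?_, fun S => rfl⟩
      by_cases hje : j = sj.length
      · exact Or.inl hje
      · exact Or.inr (fun hg => hc ⟨by omega, hg⟩)

theorem pvCalcLoopEval (nums : List Int) (sj : List String) (hlen : sj.length + 1 = nums.length) :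
    ∀ (fuel i : Nat) (v : Int), i ≤ nums.length → nums.length - i ≤ fuel →
      pvCalcLoop fuel nums sj i v =
        v + ((List.foldl (pvStep pvJx) (0, nums.getD i 0) ((sj.drop i).zip (nums.drop (i + 1)))).1 +
             (List.foldl (pvStep pvJx) (0, nums.getD i 0) ((sj.drop i).zip (nums.drop (i + 1)))).2) := by
  intro fuel
  induction fuel with
  | zero =>
    intro i v hi hf
    have hie : i = nums.length := by omega
    subst hie
    have hd : sj.drop nums.length = [] := List.drop_eq_nil_of_le (by omega)
    have hg : nums.getD nums.length 0 = 0 := List.getD_eq_default nums 0 (le_refl _)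
    rw [show pvCalcLoop 0 nums sj nums.length v = v from rfl, hd]
    simp only [List.zip_nil_left, List.foldl_nil]
    rw [hg]; ring
  | succ f ih =>
    intro i v hi hf
    by_cases hin : i < nums.length
    · simp only [pvCalcLoop, if_pos hin]
      by_cases hleaf : i = sj.length
      · rw [if_pos hleaf]
        have hd : sj.drop i = [] := List.drop_eq_nil_of_le (by omega)
        rw [hd]
        simp only [List.zip_nil_left, List.foldl_nil]
        ring
      · have hilt : i < sj.length := by omega
        have hi1n : i + 1 < nums.length := by omega
        rw [if_neg hleaf]
        by_cases hjj : sj.getD i "" = "j"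
        · rw [if_pos hjj]
          obtain ⟨h1, h2, h3, h4⟩ :=
            pvInnerSpec nums sj (by omega) (sj.length - i) i (nums.getD i 0) (by omega) (by omega)
          set r := pvCalcInner (sj.length - i) nums sj i (nums.getD i 0) with hr
          have hr1n : r.1 + 1 ≤ nums.length := by omega
          have hruel : nums.length - (r.1 + 1) ≤ f := by omega
          rw [ih (r.1 + 1) (v + r.2) hr1n hruel]
          rw [h4 0]
          by_cases hreq : r.1 = sj.length
          · have hdr : sj.drop r.1 = [] := List.drop_eq_nil_of_le (le_of_eq hreq.symm)
            have hdr2 : sj.drop (r.1 + 1) = [] := List.drop_eq_nil_of_le (by omega)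
            have hg : nums.getD (r.1 + 1) 0 = 0 := List.getD_eq_default nums 0 (by omega)
            rw [hdr, hdr2]
            simp only [List.zip_nil_left, List.foldl_nil]
            rw [hg]; ring
          · have hrlt : r.1 < sj.length := by omega
            have hrne : ¬ sj.getD r.1 "" = "j" := by
              rcases h3 with h3 | h3
              · exact absurd h3 hreq
              · exact h3
            have hr1nlt : r.1 + 1 < nums.length := by omega
            rw [List.drop_eq_getElem_cons hrlt, List.drop_eq_getElem_cons hr1nlt,
              List.zip_cons_cons, List.foldl_cons]
            have hsj : pvJx sj[r.1] = false := by
              have : sj[r.1] ≠ "j" := by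
                rw [← List.getD_eq_getElem sj "" hrlt]; exact hrne
              simp [pvJx, this]
            simp only [pvStep, hsj, Bool.false_eq_true, if_false]
            rw [pvFoldlShift pvJx _ 0 r.2 nums[r.1 + 1]]
            have hg1 : nums.getD (r.1 + 1) 0 = nums[r.1 + 1] := List.getD_eq_getElem nums 0 hr1nlt
            rw [hg1]
            ring
        · rw [if_neg hjj]
          rw [ih (i + 1) (v + nums.getD i 0) (by omega) (by omega)]
          rw [List.drop_eq_getElem_cons hilt, List.drop_eq_getElem_cons hi1n,
            List.zip_cons_cons, List.foldl_cons]
          have hsj : pvJx sj[i] = false := by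
            have : sj[i] ≠ "j" := by
              rw [← List.getD_eq_getElem sj "" hilt]; exact hjj
            simp [pvJx, this]
          simp only [pvStep, hsj, Bool.false_eq_true, if_false]
          rw [pvFoldlShift pvJx _ 0 (nums.getD i 0) nums[i + 1]]
          have hg1 : nums.getD (i + 1) 0 = nums[i + 1] := List.getD_eq_getElem nums 0 hi1n
          rw [hg1]
          ring
    · have hie : i = nums.length := by omega
      subst hie
      have hd : sj.drop nums.length = [] := List.drop_eq_nil_of_le (by omega)
      have hg : nums.getD nums.length 0 = 0 := List.getD_eq_default nums 0 (le_refl _)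
      simp only [pvCalcLoop, if_neg hin]
      rw [hd]
      simp only [List.zip_nil_left, List.foldl_nil]
      rw [hg]; ring

theorem pvCalcTestEval (nums : List Int) (sj : List String) (u : String) (jn : String → Bool)
    (hmap : (fun d => pvJx (if d = "?" then u else d)) = jn)
    (hne : nums ≠ []) (hk : sj.length + 1 ≤ nums.length) :
    pvCalcTest nums sj u =
      (List.foldl (pvStep pvJx)
          (List.foldl (pvStep jn) (0, nums.getD 0 0) (sj.zip (nums.drop 1)))
          ((List.replicate (nums.drop (sj.length + 1)).length u).zip (nums.drop (sj.length + 1)))).1 +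
      (List.foldl (pvStep pvJx)
          (List.foldl (pvStep jn) (0, nums.getD 0 0) (sj.zip (nums.drop 1)))
          ((List.replicate (nums.drop (sj.length + 1)).length u).zip (nums.drop (sj.length + 1)))).2 := by
  have hn1 : 1 ≤ nums.length := by
    cases nums with
    | nil => exact absurd rfl hne
    | cons a l => simp
  simp only [pvCalcTest]
  have h1 : (if sj.length + 1 < nums.length
      then sj ++ List.replicate (nums.length - sj.length - 1) u
      else sj) = sj ++ List.replicate (nums.length - sj.length - 1) u := by
    by_cases h : sj.length + 1 < nums.length
    · rw [if_pos h]
    · rw [if_neg h]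
      have h0 : nums.length - sj.length - 1 = 0 := by omega
      rw [h0]; simp
  rw [h1]
  have hru : (if u = "?" then u else u) = u := ite_self u
  have hmapped : (sj ++ List.replicate (nums.length - sj.length - 1) u).map
      (fun x => if x = "?" then u else x) =
      sj.map (fun x => if x = "?" then u else x) ++ List.replicate (nums.length - sj.length - 1) u := by
    rw [List.map_append, List.map_replicate, hru]
  rw [hmapped]
  have hlenM : (sj.map (fun x => if x = "?" then u else x) ++
      List.replicate (nums.length - sj.length - 1) u).length + 1 = nums.length := by
    simp [List.length_append, List.length_map, List.length_replicate]
    omega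
  rw [pvCalcLoopEval nums _ hlenM nums.length 0 0 (by omega) (by omega)]
  rw [List.drop_zero]
  rw [pvZipAppendSplit _ _ (nums.drop 1) (by simp [List.length_map, List.length_drop]; omega)]
  rw [List.foldl_append]
  rw [pvMapZipFold pvJx (fun x => if x = "?" then u else x) sj (nums.drop 1) _]
  rw [hmap]
  have hdd : (nums.drop 1).drop (sj.map (fun x => if x = "?" then u else x)).length =
      nums.drop (sj.length + 1) := by
    rw [List.length_map, List.drop_drop, Nat.add_comm]
  rw [hdd]
  have hrep : nums.length - sj.length - 1 = (nums.drop (sj.length + 1)).length := by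
    simp [List.length_drop]; omega
  rw [hrep]
  ring

theorem pvCalcTestS (nums : List Int) (sj : List String)
    (hne : nums ≠ []) (hk : sj.length + 1 ≤ nums.length) :
    pvCalcTest nums sj "s" =
      (pvX nums sj).1 + (pvX nums sj).2 + (nums.drop (sj.length + 1)).sum := by
  rw [pvCalcTestEval nums sj "s" pvJx pvReJx hne hk]
  have hu : pvJx "s" = false := by simp [pvJx]
  have h2 := pvTailS pvJx "s" hu (nums.drop (sj.length + 1)) (pvX nums sj).1 (pvX nums sj).2
  rw [Prod.mk.eta] at h2
  simp only [pvX] at h2 ⊢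
  rw [h2]

theorem pvCalcTestJ (nums : List Int) (sj : List String)
    (hne : nums ≠ []) (hk : sj.length + 1 ≤ nums.length) :
    pvCalcTest nums sj "j" =
      (pvY nums sj).1 + ((pvY nums sj).2 * 10 ^ (nums.drop (sj.length + 1)).length +
        pvCat (nums.drop (sj.length + 1))) := by
  rw [pvCalcTestEval nums sj "j" pvJy pvReJy hne hk]
  have hu : pvJx "j" = true := by simp [pvJx]
  have h2 := pvTailJ pvJx "j" hu (nums.drop (sj.length + 1)) (pvY nums sj).1 (pvY nums sj).2
  rw [Prod.mk.eta] at h2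
  simp only [pvY] at h2 ⊢
  rw [h2]

theorem pvFoldAppend (jn : String → Bool) (nums : List Int) (sj : List String) (a : String)
    (h : sj.length + 1 < nums.length) :
    List.foldl (pvStep jn) (0, nums.getD 0 0) ((sj ++ [a]).zip (nums.drop 1)) =
      pvStep jn (List.foldl (pvStep jn) (0, nums.getD 0 0) (sj.zip (nums.drop 1)))
        (a, nums.getD (sj.length + 1) 0) := by
  rw [pvZipAppendSplit sj [a] (nums.drop 1) (by simp [List.length_drop]; omega)]
  have hdd : (nums.drop 1).drop sj.length = nums.drop (sj.length + 1) := by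
    rw [List.drop_drop, Nat.add_comm]
  rw [hdd]
  rw [List.foldl_append]
  rw [List.drop_eq_getElem_cons h]
  have hg : nums.getD (sj.length + 1) 0 = nums[sj.length + 1] := List.getD_eq_getElem nums 0 h
  rw [hg]
  simp only [List.zip_cons_cons, List.zip_nil_left, List.foldl_cons, List.foldl_nil]

theorem pvAchar (nums : List Int) (target : Int) (hne : nums ≠ []) :
    ∀ (fuel : Nat) (sj : List String), sj.length + 1 ≤ nums.length →
      nums.length - sj.length ≤ fuel →
      pvStsGo fuel nums sj target =
        pvRes target (nums.drop (sj.length + 1)) (pvX nums sj) (pvY nums sj) := by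
  intro fuel
  induction fuel with
  | zero => intro sj h1 h2; omega
  | succ f ih =>
    intro sj h1 h2
    by_cases hleaf : sj.length + 1 = nums.length
    · simp only [pvStsGo, if_pos hleaf]
      have hd : nums.drop (sj.length + 1) = [] := List.drop_eq_nil_of_le (le_of_eq hleaf.symm)
      have hcv : pvCalcTest nums sj "j" = (pvY nums sj).1 + (pvY nums sj).2 := by
        rw [pvCalcTestJ nums sj hne h1, hd]
        simp [pvCat]
      rw [hcv, hd]
      rfl
    · have hlt : sj.length + 1 < nums.length := by omega
      simp only [pvStsGo, if_neg hleaf]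
      have hdn : nums.drop (sj.length + 1) = nums[sj.length + 1] :: nums.drop (sj.length + 2) :=
        List.drop_eq_getElem_cons hlt
      have hsum : (nums.drop (sj.length + 1)).sum =
          nums[sj.length + 1] + (nums.drop (sj.length + 2)).sum := by rw [hdn, List.sum_cons]
      have hlen1 : (nums.drop (sj.length + 1)).length = (nums.drop (sj.length + 2)).length + 1 := by
        rw [hdn, List.length_cons]
      have hmn : pvCalcTest nums sj "s" =
          (pvX nums sj).1 + (pvX nums sj).2 +
            (nums[sj.length + 1] + (nums.drop (sj.length + 2)).sum) := by
        rw [pvCalcTestS nums sj hne h1, hsum]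
      have hmx : pvCalcTest nums sj "j" =
          (pvY nums sj).1 + (pvY nums sj).2 * 10 ^ ((nums.drop (sj.length + 2)).length + 1) +
            pvCat (nums[sj.length + 1] :: nums.drop (sj.length + 2)) := by
        rw [pvCalcTestJ nums sj hne h1, hlen1, ← hdn]
        ring
      rw [hmn, hmx, hdn]
      simp only [pvRes]
      split_ifs with hguard
      · have hgD : nums.getD (sj.length + 1) 0 = nums[sj.length + 1] :=
          List.getD_eq_getElem nums 0 hlt
        have hlj : (sj ++ ["j"]).length = sj.length + 1 := by simp
        have hls : (sj ++ ["s"]).length = sj.length + 1 := by simp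
        rw [ih (sj ++ ["j"]) (by simp; omega) (by simp; omega),
            ih (sj ++ ["s"]) (by simp; omega) (by simp; omega)]
        have hXj : pvX nums (sj ++ ["j"]) =
            ((pvX nums sj).1, (pvX nums sj).2 * 10 + nums[sj.length + 1]) := by
          simp only [pvX, hlj]
          rw [pvFoldAppend pvJx nums sj "j" hlt, hgD]
          simp [pvStep, pvJx]
        have hYj : pvY nums (sj ++ ["j"]) =
            ((pvY nums sj).1, (pvY nums sj).2 * 10 + nums[sj.length + 1]) := by
          simp only [pvY, hlj]
          rw [pvFoldAppend pvJy nums sj "j" hlt, hgD]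
          simp [pvStep, pvJy]
        have hXs : pvX nums (sj ++ ["s"]) =
            ((pvX nums sj).1 + (pvX nums sj).2, nums[sj.length + 1]) := by
          simp only [pvX, hls]
          rw [pvFoldAppend pvJx nums sj "s" hlt, hgD]
          simp [pvStep, pvJx]
        have hYs : pvY nums (sj ++ ["s"]) =
            ((pvY nums sj).1 + (pvY nums sj).2, nums[sj.length + 1]) := by
          simp only [pvY, hls]
          rw [pvFoldAppend pvJy nums sj "s" hlt, hgD]
          simp [pvStep, pvJy]
        rw [hXj, hYj, hXs, hYs, hlj, hls]
      · rfl

theorem pvBeqComm (a b : Int) : (a == b) = (b == a) := by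
  by_cases h : a = b
  · simp [h]
  · have h' : ¬ b = a := fun hh => h hh.symm
    simp [beq_iff_eq, h, h']

-- proof-side names for the two lambdas of smart_tree_search_alt (definitionally equal)
def pvBStep : (Int × Int × Int × Int) → (String × Int) → (Int × Int × Int × Int) :=
  fun st pr =>
    if pr.1 = "j" then (st.1, st.2.1 * 10 + pr.2, st.2.2.1, st.2.2.2 * 10 + pr.2)
    else if pr.1 = "?" then (st.1 + st.2.1, pr.2, st.2.2.1, st.2.2.2 * 10 + pr.2)
    else (st.1 + st.2.1, pr.2, st.2.2.1 + st.2.2.2, pr.2)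

def pvBody (nums : List Int) (target : Int) :
    PySem.Set (Int × Int × Int × Int) → Int → PySem.Set (Int × Int × Int × Int) :=
  fun F t =>
    let rest := PySem.List.slice nums (some (t + 1)) none
    let loTail := rest.sum
    let p : Int := 10 ^ rest.length
    let hiTail := List.foldl (fun a d => a * 10 + d) 0 rest
    let dig := PySem.List.pyGetD nums (t + 1) 0
    List.foldl (fun (nxt : PySem.Set (Int × Int × Int × Int)) st =>
        if st.1 + st.2.1 + loTail ≤ target ∧ target ≤ st.2.2.1 + st.2.2.2 * p + hiTail then
          PySem.Set.add (PySem.Set.add nxt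
              (st.1, st.2.1 * 10 + dig, st.2.2.1, st.2.2.2 * 10 + dig))
            (st.1 + st.2.1, dig, st.2.2.1 + st.2.2.2, dig)
        else nxt)
      PySem.Set.empty F

theorem pvBStepEq (st : Int × Int × Int × Int) (pr : String × Int) :
    pvBStep st pr =
      ((pvStep pvJx (st.1, st.2.1) pr).1, (pvStep pvJx (st.1, st.2.1) pr).2,
       (pvStep pvJy (st.2.2.1, st.2.2.2) pr).1, (pvStep pvJy (st.2.2.1, st.2.2.2) pr).2) := by
  by_cases h1 : pr.1 = "j"
  · simp [pvBStep, pvStep, pvJx, pvJy, h1]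
  · by_cases h2 : pr.1 = "?" <;> simp [pvBStep, pvStep, pvJx, pvJy, h1, h2]

theorem pvPairFold :
    ∀ (l : List (String × Int)) (a b c d : Int),
      List.foldl pvBStep (a, b, c, d) l =
        ((List.foldl (pvStep pvJx) (a, b) l).1, (List.foldl (pvStep pvJx) (a, b) l).2,
         (List.foldl (pvStep pvJy) (c, d) l).1, (List.foldl (pvStep pvJy) (c, d) l).2) := by
  intro l
  induction l with
  | nil => intro a b c d; rfl
  | cons pr l ih =>
    intro a b c d
    simp only [List.foldl_cons, pvBStepEq]
    rw [ih]

theorem pvMemBody {α : Type} [BEq α] [LawfulBEq α] (P : α → Prop) [DecidablePred P]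
    (c1 c2 : α → α) :
    ∀ (F : List α) (E : PySem.Set α) (x : α),
      (x ∈ List.foldl (fun (nxt : PySem.Set α) st =>
          if P st then PySem.Set.add (PySem.Set.add nxt (c1 st)) (c2 st) else nxt) E F ↔
        x ∈ E ∨ ∃ st ∈ F, P st ∧ (x = c1 st ∨ x = c2 st)) := by
  intro F
  induction F with
  | nil => intro E x; simp
  | cons st F ih =>
    intro E x
    simp only [List.foldl_cons]
    by_cases hP : P st
    · rw [if_pos hP, ih]
      constructor
      · rintro (hE | h)
        · rw [PySem.Set.mem_add, PySem.Set.mem_add] at hE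
          rcases hE with (hE | hE) | hE
          · exact Or.inl hE
          · exact Or.inr ⟨st, by simp, hP, Or.inl hE⟩
          · exact Or.inr ⟨st, by simp, hP, Or.inr hE⟩
        · obtain ⟨st', hst', h1, h2⟩ := h
          exact Or.inr ⟨st', by simp [hst'], h1, h2⟩
      · rintro (hE | ⟨st', hst', h1, h2⟩)
        · exact Or.inl (by rw [PySem.Set.mem_add, PySem.Set.mem_add]; exact Or.inl (Or.inl hE))
        · rcases List.mem_cons.1 hst' with heq | hmem
          · subst heq
            rcases h2 with h2 | h2
            · exact Or.inl (by rw [PySem.Set.mem_add, PySem.Set.mem_add]; exact Or.inl (Or.inr h2))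
            · exact Or.inl (by rw [PySem.Set.mem_add, PySem.Set.mem_add]; exact Or.inr h2)
          · exact Or.inr ⟨st', hmem, h1, h2⟩
    · rw [if_neg hP, ih]
      constructor
      · rintro (hE | ⟨st', hst', h1, h2⟩)
        · exact Or.inl hE
        · exact Or.inr ⟨st', List.mem_cons_of_mem _ hst', h1, h2⟩
      · rintro (hE | ⟨st', hst', h1, h2⟩)
        · exact Or.inl hE
        · rcases List.mem_cons.1 hst' with heq | hmem
          · subst heq; exact absurd h1 hP
          · exact Or.inr ⟨st', hmem, h1, h2⟩

theorem pvMemPvBody (nums : List Int) (target : Int) (t : Nat) (ht : t + 1 < nums.length)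
    (F : List (Int × Int × Int × Int)) (x : Int × Int × Int × Int) :
    x ∈ pvBody nums target F (t : Int) ↔
      ∃ st ∈ F,
        (st.1 + st.2.1 + (nums.drop (t + 1)).sum ≤ target ∧
          target ≤ st.2.2.1 + st.2.2.2 * 10 ^ (nums.drop (t + 1)).length +
            pvCat (nums.drop (t + 1))) ∧
        (x = (st.1, st.2.1 * 10 + nums[t + 1], st.2.2.1, st.2.2.2 * 10 + nums[t + 1]) ∨
         x = (st.1 + st.2.1, nums[t + 1], st.2.2.1 + st.2.2.2, nums[t + 1])) := by
  have hc : ((t : Int) + 1) = ((t + 1 : Nat) : Int) := by push_cast; ring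
  have hrest : PySem.List.slice nums (some ((t : Int) + 1)) none = nums.drop (t + 1) := by
    rw [hc, PySem.List.slice_from_natCast]
  have hdig : PySem.List.pyGetD nums ((t : Int) + 1) 0 = nums[t + 1] := by
    rw [hc, PySem.List.pyGetD_natCast]
    exact List.getD_eq_getElem nums 0 ht
  unfold pvBody
  simp only [hrest, hdig, pvCat]
  rw [pvMemBody]
  simp [PySem.Set.empty]

theorem pvLevels (nums : List Int) (target : Int) :
    ∀ (m t : Nat) (F : List (Int × Int × Int × Int)), t + m + 1 = nums.length →
      (List.foldl (pvBody nums target) F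
          (PySem.List.pyRange (t : Int) ((nums.length : Int) - 1) 1)).any
        (fun st => st.2.2.1 + st.2.2.2 == target) =
      F.any (fun st => pvRes target (nums.drop (t + 1)) (st.1, st.2.1) (st.2.2.1, st.2.2.2)) := by
  intro m
  induction m with
  | zero =>
    intro t F ht
    rw [PySem.List.pyRange_one_eq_nil (by push_cast; omega)]
    simp only [List.foldl_nil]
    have hd : nums.drop (t + 1) = [] := List.drop_eq_nil_of_le (by omega)
    rw [hd]
    apply Bool.coe_iff_coe.mp
    simp only [List.any_eq_true, pvRes]
    constructor
    · rintro ⟨st, hst, h⟩; exact ⟨st, hst, by rwa [pvBeqComm]⟩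
    · rintro ⟨st, hst, h⟩; exact ⟨st, hst, by rwa [pvBeqComm]⟩
  | succ m ih =>
    intro t F ht
    rw [PySem.List.pyRange_one_cons (by push_cast; omega)]
    rw [List.foldl_cons]
    have hc : ((t : Int) + 1) = ((t + 1 : Nat) : Int) := by push_cast; ring
    rw [hc, ih (t + 1) _ (by omega)]
    have ht1n : t + 1 < nums.length := by omega
    have hdn : nums.drop (t + 1) = nums[t + 1] :: nums.drop (t + 2) :=
      List.drop_eq_getElem_cons ht1n
    apply Bool.coe_iff_coe.mp
    simp only [List.any_eq_true]
    have hguard : ∀ st : Int × Int × Int × Int,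
        ((st.1 + st.2.1 + (nums.drop (t + 1)).sum ≤ target ∧
          target ≤ st.2.2.1 + st.2.2.2 * 10 ^ (nums.drop (t + 1)).length +
            pvCat (nums.drop (t + 1))) ↔
         (st.1 + st.2.1 + (nums[t + 1] + (nums.drop (t + 2)).sum) ≤ target ∧
          target ≤ st.2.2.1 + st.2.2.2 * 10 ^ ((nums.drop (t + 2)).length + 1) +
            pvCat (nums[t + 1] :: nums.drop (t + 2)))) := by
      intro st
      rw [hdn, List.sum_cons, List.length_cons]
    constructor
    · rintro ⟨x, hx, hresx⟩
      rw [pvMemPvBody nums target t ht1n] at hx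
      obtain ⟨st, hst, hP, hch⟩ := hx
      refine ⟨st, hst, ?_⟩
      rw [hdn]
      simp only [pvRes]
      rw [if_pos ((hguard st).1 hP)]
      rcases hch with hch | hch <;> subst hch
      · simp [hresx]
      · simp [hresx]
    · rintro ⟨st, hst, hres⟩
      rw [hdn] at hres
      simp only [pvRes] at hres
      by_cases hP : st.1 + st.2.1 + (nums[t + 1] + (nums.drop (t + 2)).sum) ≤ target ∧
          target ≤ st.2.2.1 + st.2.2.2 * 10 ^ ((nums.drop (t + 2)).length + 1) +
            pvCat (nums[t + 1] :: nums.drop (t + 2))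
      · rw [if_pos hP] at hres
        rcases (by simpa using hres : _ = true ∨ _ = true) with hres | hres
        · refine ⟨(st.1, st.2.1 * 10 + nums[t + 1], st.2.2.1, st.2.2.2 * 10 + nums[t + 1]),
            ?_, hres⟩
          rw [pvMemPvBody nums target t ht1n]
          exact ⟨st, hst, (hguard st).2 hP, Or.inl rfl⟩
        · refine ⟨(st.1 + st.2.1, nums[t + 1], st.2.2.1 + st.2.2.2, nums[t + 1]), ?_, hres⟩
          rw [pvMemPvBody nums target t ht1n]
          exact ⟨st, hst, (hguard st).2 hP, Or.inr rfl⟩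
      · rw [if_neg hP] at hres
        exact absurd hres (by simp)

theorem pvAltEq (nums : List Int) (sj : List String) (target : Int) :
    smart_tree_search_alt nums sj target =
      (let st0 := List.foldl pvBStep (0, nums.getD 0 0, 0, nums.getD 0 0)
          (sj.zip (List.drop 1 nums));
       if (sj.length : Int) = (nums.length : Int) - 1 then
         target == st0.2.2.1 + st0.2.2.2
       else
         (List.foldl (pvBody nums target) (PySem.Set.ofList [st0])
             (PySem.List.pyRange (sj.length : Int) ((nums.length : Int) - 1) 1)).any
           (fun st => st.2.2.1 + st.2.2.2 == target)) := rfl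

theorem smart_tree_search_spec : Claim_equal_smart_tree_search := by
  intro nums sj target hdom hpre
  obtain ⟨hne, hcase⟩ := hpre
  have hn1 : 1 ≤ nums.length := by
    cases nums with
    | nil => exact absurd rfl hne
    | cons a l => simp
  unfold Spec_smart_tree_search
  by_cases hk : sj.length + 1 ≤ nums.length
  · -- main case: split_joins no longer than len(nums) - 1
    have hA : smart_tree_search nums sj target =
        pvRes target (nums.drop (sj.length + 1)) (pvX nums sj) (pvY nums sj) := by
      unfold smart_tree_search
      exact pvAchar nums target hne _ sj hk (by omega)
    have hst0 : List.foldl pvBStep (0, nums.getD 0 0, 0, nums.getD 0 0)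
        (sj.zip (List.drop 1 nums)) =
        ((pvX nums sj).1, (pvX nums sj).2, (pvY nums sj).1, (pvY nums sj).2) := by
      rw [pvPairFold]
      simp only [pvX, pvY]
    have hB : smart_tree_search_alt nums sj target =
        pvRes target (nums.drop (sj.length + 1)) (pvX nums sj) (pvY nums sj) := by
      rw [pvAltEq]
      simp only [hst0]
      by_cases hkn : (sj.length : Int) = (nums.length : Int) - 1
      · rw [if_pos hkn]
        have hdrop : nums.drop (sj.length + 1) = [] := List.drop_eq_nil_of_le (by omega)
        rw [hdrop]
        rfl
      · rw [if_neg hkn]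
        have hlt : sj.length + 1 < nums.length := by omega
        rw [pvLevels nums target (nums.length - 1 - (sj.length + 1) + 1) sj.length _ (by omega)]
        simp [PySem.Set.ofList, PySem.Set.add, PySem.Set.empty]
    rw [hA, hB]
  · -- over-long split_joins: both programs return false
    have hover : nums.length ≤ sj.length := by omega
    obtain ⟨hlast, hq, hval⟩ : ¬ sj.getD (nums.length - 1) "" = "j" ∧
        ¬ "?" ∈ sj.take (nums.length - 1) ∧
        target ≠ (pvY nums sj).1 + (pvY nums sj).2 := by
      rcases hcase with h | h
      · exact absurd h hk
      · exact h
    have hA : smart_tree_search nums sj target = false := by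
      unfold smart_tree_search
      rcases Nat.lt_or_ge nums.length sj.length with hgt | hle
      · have h0 : nums.length + 1 - sj.length = 0 := by omega
        rw [h0]
        rfl
      · have hkeq : sj.length = nums.length := by omega
        have h1 : nums.length + 1 - sj.length = 1 := by omega
        rw [h1]
        simp only [pvStsGo]
        rw [if_neg (by omega)]
        split_ifs <;> rfl
    have hB : smart_tree_search_alt nums sj target = false := by
      rw [pvAltEq]
      rw [if_neg (by push_cast; omega)]
      rw [PySem.List.pyRange_one_eq_nil (by push_cast; omega)]
      simp only [List.foldl_nil]
      rw [pvPairFold]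
      have hf : ((pvY nums sj).1 + (pvY nums sj).2 == target) = false := by
        simp only [beq_eq_false_iff_ne, ne_eq]
        exact fun h => hval h.symm
      show (PySem.Set.ofList [((pvX nums sj).1, (pvX nums sj).2, (pvY nums sj).1,
          (pvY nums sj).2)]).any (fun st => st.2.2.1 + st.2.2.2 == target) = false
      rw [show PySem.Set.ofList [((pvX nums sj).1, (pvX nums sj).2, (pvY nums sj).1,
          (pvY nums sj).2)] = [((pvX nums sj).1, (pvX nums sj).2, (pvY nums sj).1,
          (pvY nums sj).2)] from rfl]
      simp only [List.any_cons, List.any_nil, Bool.or_false]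
      exact hf
    rw [hA, hB]
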